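-- pv_equiv track=rewrite | github.com/MaximoRdz/AdventOfCode | day-11/day-11.py | expand_matrix
-- ===== SOURCE A (Python) =====
-- def expand_matrix(matrix):
--     # if not galaxy in row or column then its duplicated
--     rows_ind = []
--     for i, line in enumerate(matrix):
--         if len(set(line)) == 1:
--             rows_ind.append(i)
--
--     cols_ind = []
--     for j in range(len(matrix[0])):
--         column = [matrix[i][j]  for i in range(len(matrix))]
--         if len(set(column)) == 1:
--             cols_ind.append(j)
--
--     # insert rows
--     row = ["." for _ in range(len(matrix[0]))]
--     for n, i in enumerate(rows_ind):
--         matrix.insert(i+n, row.copy())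
--
--     # # insert cols
--     for row in matrix:
--         for n, j in enumerate(cols_ind):
--             row.insert(j+n, ".")
--
--     return matrix
-- ===== SOURCE B (Python) =====
-- def expand_matrix(matrix):
--     # Mask-based rebuild: mark empty columns once, then emit the expanded
--     # matrix in a single pass; write back in place (mutates like A).
--     first = matrix[0]
--     w = len(first)
--     col_empty = [all(r[j] == c0 for r in matrix) for j, c0 in enumerate(first)]
--     dot_row = ["."] * (w + sum(col_empty))
--     new = []
--     for r in matrix:
--         er = []
--         for j, x in enumerate(r):
--             if j < w and col_empty[j]:
--                 er.append(".")
--             er.append(x)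
--         if r and all(x == r[0] for x in r):
--             new.append(dot_row.copy())
--         new.append(er)
--     matrix[:] = new
--     return matrix
-- ===== Notes on version B (the rewrite author's own statement) =====
-- stated objective: faster
-- what changed: Instead of collecting index lists and repeatedly calling list.insert (which shifts the tail of the list on every insertion), B precomputes an empty-column boolean mask once and rebuilds the whole expanded matrix in a single pass, appending cells and '.' markers; the result is written back in place as in A.
import Mathlib
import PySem

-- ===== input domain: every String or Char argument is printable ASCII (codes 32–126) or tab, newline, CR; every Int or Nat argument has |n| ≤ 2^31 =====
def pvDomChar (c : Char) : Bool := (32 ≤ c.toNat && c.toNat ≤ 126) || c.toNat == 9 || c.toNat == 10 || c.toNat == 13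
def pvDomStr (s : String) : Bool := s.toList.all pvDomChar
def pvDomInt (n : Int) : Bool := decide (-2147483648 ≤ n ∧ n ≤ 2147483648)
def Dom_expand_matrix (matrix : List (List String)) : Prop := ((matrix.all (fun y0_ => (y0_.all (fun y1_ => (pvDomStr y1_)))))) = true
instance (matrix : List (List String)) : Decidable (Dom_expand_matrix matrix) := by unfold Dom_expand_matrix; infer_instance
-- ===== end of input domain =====

-- B rebuilds the matrix in one pass from an empty-column mask instead of A's repeated
-- list.insert calls; both Pythons mutate the argument in place, the theorems are about the
-- (identical) returned value.

-- ===== PORT A =====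
def expand_matrix (matrix : List (List String)) : List (List String) :=
  let rows_ind : List Int :=
    (PySem.List.enumerate matrix).foldl
      (fun acc p => if (PySem.Set.ofList p.2).length == 1 then acc ++ [p.1] else acc) []
  let cols_ind : List Int :=
    (PySem.List.pyRange 0 ((PySem.List.pyGetD matrix 0 []).length : Int)).foldl
      (fun acc j =>
        let column := (PySem.List.pyRange 0 (matrix.length : Int)).map
          (fun i => PySem.List.pyGetD (PySem.List.pyGetD matrix i []) j "")
        if (PySem.Set.ofList column).length == 1 then acc ++ [j] else acc) []
  let row : List String :=
    (PySem.List.pyRange 0 ((PySem.List.pyGetD matrix 0 []).length : Int)).map (fun _ => ".")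
  let m1 := (PySem.List.enumerate rows_ind).foldl
      (fun acc p => PySem.List.insert acc (p.2 + p.1) row) matrix
  m1.map (fun r => (PySem.List.enumerate cols_ind).foldl
      (fun acc p => PySem.List.insert acc (p.2 + p.1) ".") r)

-- ===== PORT B =====
def expand_matrix_alt (matrix : List (List String)) : List (List String) :=
  let first : List String := PySem.List.pyGetD matrix 0 []
  let w : Int := (first.length : Int)
  let colEmpty : List Bool := (PySem.List.enumerate first).map
    (fun p => matrix.all (fun r => PySem.List.pyGetD r p.1 "" == p.2))
  let dotRow : List String := PySem.List.pyRepeat ["."] (w + (colEmpty.count true : Int))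
  matrix.foldl (fun acc r =>
    let er : List String := (PySem.List.enumerate r).foldl
      (fun e p =>
        (if decide (p.1 < w) && PySem.List.pyGetD colEmpty p.1 false then e ++ ["."] else e)
          ++ [p.2]) []
    (if !r.isEmpty && r.all (fun x => x == PySem.List.pyGetD r 0 "") then acc ++ [dotRow] else acc)
      ++ [er]) []

-- ===== PRECONDITION & SPEC =====
-- Pre_ excludes exactly the inputs on which Python A raises IndexError: the empty matrix
-- (matrix[0]) and matrices with a row shorter than row 0 (matrix[i][j] in the column scan).
def Pre_expand_matrix (matrix : List (List String)) : Prop :=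
  matrix ≠ [] ∧ ∀ r ∈ matrix, (matrix.headD []).length ≤ r.length
instance (matrix : List (List String)) : Decidable (Pre_expand_matrix matrix) := by
  unfold Pre_expand_matrix; infer_instance
def pvWitness_expand_matrix : List (List String) := [["#", "."], [".", "."]]

def Spec_expand_matrix (matrix : List (List String)) (out : List (List String)) : Prop := out = expand_matrix_alt matrix
instance (matrix : List (List String)) (out : List (List String)) : Decidable (Spec_expand_matrix matrix out) := by unfold Spec_expand_matrix; infer_instance

-- ===== CLAIM (what is proved, stated in full; the proofs are below) =====
def Claim_equal_expand_matrix : Prop := ∀ (matrix : List (List String)), Dom_expand_matrix matrix → Pre_expand_matrix matrix → Spec_expand_matrix matrix (expand_matrix matrix)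

-- ===== LEMMAS AND PROOFS =====


def expandQ {α : Type} (v : α) (Q : Int → Bool) : Int → List α → List α
  | _, [] => []
  | k, x :: t => (if Q k then [v, x] else [x]) ++ expandQ v Q (k + 1) t

lemma expandQ_eq_flatMap {α : Type} (v : α) (Q : Int → Bool) :
    ∀ (r : List α) (k : Int),
      expandQ v Q k r
        = (PySem.List.enumerate r k).flatMap (fun p => (if Q p.1 then [v] else []) ++ [p.2]) := by
  intro r
  induction r with
  | nil => intro k; simp [expandQ, PySem.List.enumerate_nil]
  | cons x t ih =>
      intro k
      simp only [expandQ, PySem.List.enumerate_cons, List.flatMap_cons, ih]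
      cases hQ : Q k <;> simp [hQ]

lemma expandQ_replicate {α : Type} (v : α) (Q : Int → Bool) :
    ∀ (n : Nat) (k : Int),
      expandQ v Q k (List.replicate n v)
        = List.replicate (n + ((PySem.List.pyRange k (k + (n : Int))).filter Q).length) v := by
  intro n
  induction n with
  | zero => intro k; simp [expandQ, PySem.List.pyRange_one_eq_nil (le_refl k)]
  | succ n ih =>
      intro k
      rw [List.replicate_succ]
      have hlt : k < k + ((n : Nat) + 1 : Int) := by omega
      rw [show ((n + 1 : Nat) : Int) = ((n : Nat) + 1 : Int) by push_cast; ring]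
      rw [PySem.List.pyRange_one_cons hlt]
      rw [show k + ((n : Nat) + 1 : Int) = (k + 1) + (n : Int) by ring]
      show (if Q k then [v, v] else [v]) ++ expandQ v Q (k + 1) (List.replicate n v) = _
      rw [ih (k + 1)]
      rw [List.eq_replicate_iff]
      refine ⟨?_, ?_⟩
      · cases hQ : Q k <;> simp [hQ] <;> omega
      · intro b hb
        cases hQ : Q k <;> simp [hQ] at hb <;> tauto

lemma expandQ_abs {α : Type} (v d : α) (pA : α → Bool) (m : List α) :
    ∀ (suf pre : List α), m = pre ++ suf →
      expandQ v (fun i => pA (PySem.List.pyGetD m i d)) (pre.length : Int) suf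
        = suf.flatMap (fun x => if pA x then [v, x] else [x]) := by
  intro suf
  induction suf with
  | nil => intro pre h; simp [expandQ]
  | cons x t ih =>
      intro pre h
      have hget : PySem.List.pyGetD m (pre.length : Int) d = x := by
        subst h
        rw [PySem.List.pyGetD_natCast]
        simp [List.getD_eq_getElem?_getD, List.getElem?_append_right (Nat.le_refl pre.length)]
      show (if pA (PySem.List.pyGetD m (pre.length : Int) d) then [v, x] else [x]) ++ _ = _
      rw [hget, List.flatMap_cons]
      congr 1
      have hlen : ((pre.length : Int) + 1) = (((pre ++ [x]).length : Nat) : Int) := by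
        simp [List.length_append]
      rw [hlen]
      exact ih (pre ++ [x]) (by simp [h])

lemma le_length_foldl_add {α : Type} [BEq α] :
    ∀ (t s : List α), s.length ≤ (t.foldl PySem.Set.add s).length := by
  intro t
  induction t with
  | nil => intro s; simp
  | cons x t ih =>
      intro s
      refine le_trans ?_ (ih (PySem.Set.add s x))
      show s.length ≤ (if s.contains x = true then s else s ++ [x]).length
      split <;> simp

lemma set_len_one {α : Type} [BEq α] [LawfulBEq α] :
    ∀ (t : List α) (a : α), (t.foldl PySem.Set.add [a]).length = 1 ↔ ∀ x ∈ t, x = a := by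
  intro t
  induction t with
  | nil => intro a; simp
  | cons x t ih =>
      intro a
      rw [List.foldl_cons]
      by_cases h : x = a
      · subst h
        have : PySem.Set.add [x] x = [x] := by
          show (if ([x] : List α).contains x = true then [x] else [x] ++ [x]) = [x]
          simp
        rw [this, ih x]
        simp
      · have hba : ¬ ((x == a) = true) := by simp [h]
        have : PySem.Set.add [a] x = [a, x] := by
          show (if ([a] : List α).contains x = true then [a] else [a] ++ [x]) = [a, x]
          simp
          exact h
        rw [this]
        have h2 : 2 ≤ (t.foldl PySem.Set.add [a, x]).length := le_length_foldl_add t [a, x]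
        constructor
        · intro hl; omega
        · intro hall; exact absurd (hall x (by simp)) h

lemma row_pred_eq (r : List String) :
    ((PySem.Set.ofList r).length == 1)
      = (!r.isEmpty && r.all (fun x => x == PySem.List.pyGetD r 0 "")) := by
  cases r with
  | nil => decide
  | cons a t =>
      rw [Bool.eq_iff_iff]
      have hofl : PySem.Set.ofList (a :: t) = t.foldl PySem.Set.add [a] := by
        rw [PySem.Set.ofList_eq_foldl, List.foldl_cons]
        congr 1
      rw [hofl]
      simp only [beq_iff_eq, List.isEmpty_cons, Bool.not_false, Bool.true_and,
        PySem.List.pyGetD_zero_cons, List.all_cons, beq_self_eq_true, Bool.true_and]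
      rw [show ((t.foldl PySem.Set.add [a]).length = 1) ↔ (∀ x ∈ t, x = a) from set_len_one t a]
      simp [List.all_eq_true]

lemma foldl_insert_enum {α : Type} (v : α) :
    ∀ (r P : List α) (c k : Nat) (Q : Int → Bool) (inds : List Int),
      P.length = k + c →
      inds = (PySem.List.pyRange (k : Int) ((k : Int) + (r.length : Int))).filter Q →
      (PySem.List.enumerate inds (c : Int)).foldl
          (fun acc p => PySem.List.insert acc (p.2 + p.1) v) (P ++ r)
        = P ++ expandQ v Q (k : Int) r := by
  intro r
  induction r with
  | nil =>
      intro P c k Q inds hP hinds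
      rw [hinds]
      simp [PySem.List.pyRange_one_eq_nil (by omega : (k:Int) + (0:Nat) ≤ k), expandQ,
        PySem.List.enumerate_nil]
  | cons x t ih =>
      intro P c k Q inds hP hinds
      have hcons : PySem.List.pyRange (k : Int) ((k : Int) + ((x :: t).length : Int))
          = (k : Int) :: PySem.List.pyRange ((k : Int) + 1) ((k : Int) + ((x :: t).length : Int)) :=
        PySem.List.pyRange_one_cons (by push_cast[List.length_cons]; omega)
      have hbounds : (k : Int) + ((x :: t).length : Int) = ((k+1 : Nat) : Int) + ((t.length : Nat) : Int) := by
        push_cast[List.length_cons]; ring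
      rw [hcons, hbounds] at hinds
      show (PySem.List.enumerate inds (c : Int)).foldl
          (fun acc p => PySem.List.insert acc (p.2 + p.1) v) (P ++ x :: t)
        = P ++ ((if Q k then [v, x] else [x]) ++ expandQ v Q ((k : Int) + 1) t)
      cases hQ : Q (k : Int)
      · rw [List.filter_cons_of_neg (by simp [hQ])] at hinds
        have := ih (P ++ [x]) c (k + 1) Q inds (by simp [hP]; omega) hinds
        rw [show ((k+1 : Nat) : Int) = (k : Int) + 1 by push_cast; ring] at this
        simpa [hQ] using this
      · rw [List.filter_cons_of_pos (by simp [hQ])] at hinds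
        subst hinds
        rw [PySem.List.enumerate_cons]
        rw [List.foldl_cons]
        have hins : PySem.List.insert (P ++ x :: t) ((k : Int) + (c : Int)) v
            = (P ++ [v, x]) ++ t := by
          rw [show (k : Int) + (c : Int) = ((k + c : Nat) : Int) by push_cast; ring, ← hP]
          rw [PySem.List.insert_natCast _ _ _ (by simp)]
          simp [List.take_left, List.drop_left]
        rw [hins]
        have := ih (P ++ [v, x]) (c + 1) (k + 1) Q _ (by simp [hP]; omega) rfl
        rw [show ((k+1 : Nat) : Int) = (k : Int) + 1 by push_cast; ring,
            show ((c+1 : Nat) : Int) = (c : Int) + 1 by push_cast; ring] at this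
        simpa [hQ] using this


def QCm (m : List (List String)) : Int → Bool := fun j =>
  (PySem.Set.ofList ((PySem.List.pyRange 0 (m.length : Int)).map
    (fun i => PySem.List.pyGetD (PySem.List.pyGetD m i []) j ""))).length == 1

lemma colpred (r0 : List String) (rest : List (List String)) (j : Int) :
    QCm (r0 :: rest) j
      = (r0 :: rest).all (fun r => PySem.List.pyGetD r j "" == PySem.List.pyGetD r0 j "") := by
  unfold QCm
  have hcol : (PySem.List.pyRange 0 (((r0 :: rest).length : Nat) : Int)).map
      (fun i => PySem.List.pyGetD (PySem.List.pyGetD (r0 :: rest) i []) j "")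
      = (r0 :: rest).map (fun r => PySem.List.pyGetD r j "") := by
    rw [show (fun i => PySem.List.pyGetD (PySem.List.pyGetD (r0 :: rest) i []) j "")
          = (fun r => PySem.List.pyGetD r j "") ∘ (fun i => PySem.List.pyGetD (r0 :: rest) i []) from rfl]
    rw [← List.map_map]
    congr 1
    have := PySem.List.map_pyGetD_pyRange_zero (r0 :: rest) ([] : List String)
    simpa [PySem.List.len_eq] using this
  rw [hcol]
  rw [Bool.eq_iff_iff]
  rw [List.map_cons]
  have hofl : PySem.Set.ofList (PySem.List.pyGetD r0 j "" :: rest.map (fun r => PySem.List.pyGetD r j ""))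
      = (rest.map (fun r => PySem.List.pyGetD r j "")).foldl PySem.Set.add [PySem.List.pyGetD r0 j ""] := by
    rw [PySem.Set.ofList_eq_foldl, List.foldl_cons]
    congr 1
  rw [hofl]
  rw [show (((rest.map (fun r => PySem.List.pyGetD r j "")).foldl PySem.Set.add
        [PySem.List.pyGetD r0 j ""]).length == 1) = true
      ↔ ((rest.map (fun r => PySem.List.pyGetD r j "")).foldl PySem.Set.add
        [PySem.List.pyGetD r0 j ""]).length = 1 from by simp]
  rw [set_len_one]
  simp [List.all_eq_true]

lemma foldl_optdot {α β : Type} (pb : α → Bool) (dr : β) (er : α → β) :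
    ∀ (l : List α) (acc : List β),
      l.foldl (fun acc r => (if pb r then acc ++ [dr] else acc) ++ [er r]) acc
        = acc ++ l.flatMap (fun r => (if pb r then [dr] else []) ++ [er r]) := by
  intro l
  induction l with
  | nil => intro acc; simp
  | cons x t ih =>
      intro acc
      rw [List.foldl_cons, ih, List.flatMap_cons]
      cases h : pb x <;> simp [h]

lemma main_eq (r0 : List String) (rest : List (List String))
    (hlen : ∀ r ∈ (r0 :: rest), r0.length ≤ r.length) :
    expand_matrix (r0 :: rest) = expand_matrix_alt (r0 :: rest) := by
  simp only [expand_matrix, expand_matrix_alt, PySem.List.pyGetD_zero_cons]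
  -- A's rows_ind as a filtered range
  rw [PySem.List.foldl_append_if
        (fun p : Int × List String => (PySem.Set.ofList p.2).length == 1)
        (fun p : Int × List String => p.1),
      PySem.List.enumerate_eq_map_pyRange (r0 :: rest) []]
  simp only [List.nil_append, List.filter_map, List.map_map, PySem.List.len_eq,
    Function.comp_def, List.map_id']
  -- rewrite A's row-insertion loop
  have hm1 := foldl_insert_enum
      (List.map (fun _ : Int => ".") (PySem.List.pyRange 0 (r0.length : Int)))
      (r0 :: rest) [] 0 0
      (fun j => (PySem.Set.ofList (PySem.List.pyGetD (r0 :: rest) j [])).length == 1)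
      ((PySem.List.pyRange 0 (((r0 :: rest).length : Nat) : Int)).filter
        (fun j => (PySem.Set.ofList (PySem.List.pyGetD (r0 :: rest) j [])).length == 1))
      (by simp) (by simp)
  simp only [Nat.cast_zero, zero_add, List.nil_append] at hm1
  rw [hm1]
  -- abstract-index expandQ over the matrix is a flatMap over its rows
  have hm2 := expandQ_abs (List.map (fun _ : Int => ".") (PySem.List.pyRange 0 (r0.length : Int)))
      ([] : List String) (fun l => (PySem.Set.ofList l).length == 1) (r0 :: rest) (r0 :: rest) [] rfl
  simp only [List.length_nil, Nat.cast_zero] at hm2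
  rw [hm2, List.map_flatMap]
  -- A's cols_ind as a filtered range
  have hcols : List.foldl
      (fun acc j =>
        if ((PySem.Set.ofList
              (List.map (fun i => PySem.List.pyGetD (PySem.List.pyGetD (r0 :: rest) i []) j "")
                (PySem.List.pyRange 0 (((r0 :: rest).length : Nat) : Int)))).length == 1) = true
        then acc ++ [j] else acc)
      [] (PySem.List.pyRange 0 (r0.length : Int))
      = (PySem.List.pyRange 0 (r0.length : Int)).filter (QCm (r0 :: rest)) := by
    simpa [QCm] using PySem.List.foldl_append_if_eq_filter (QCm (r0 :: rest))
      (PySem.List.pyRange 0 (r0.length : Int)) []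
  simp only [hcols]
  -- B's outer loop as a flatMap
  rw [foldl_optdot
      (fun r : List String => !r.isEmpty && r.all fun x => x == PySem.List.pyGetD r 0 "")
      (PySem.List.pyRepeat ["."]
        ((r0.length : Int) +
          ((List.count true
              (List.map (fun p => (r0 :: rest).all fun r => PySem.List.pyGetD r p.1 "" == p.2)
                (PySem.List.enumerate r0))) : Int)))
      (fun r : List String => List.foldl
        (fun e p =>
          (if (decide (p.1 < (r0.length : Int)) &&
                PySem.List.pyGetD
                  (List.map (fun p => (r0 :: rest).all fun r => PySem.List.pyGetD r p.1 "" == p.2)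
                    (PySem.List.enumerate r0)) p.1 false) = true
            then e ++ ["."] else e) ++ [p.2])
        [] (PySem.List.enumerate r))]
  rw [List.nil_append]
  -- names for the recurring terms
  set CE : List Bool := List.map (fun p => (r0 :: rest).all fun r => PySem.List.pyGetD r p.1 "" == p.2)
      (PySem.List.enumerate r0) with hCEdef
  set Qp : Int → Bool := fun j => decide (j < (r0.length : Int)) && QCm (r0 :: rest) j with hQpdef
  -- the two filtered index lists agree for any row at least as long as row 0
  have hindeq : ∀ (n : Nat), r0.length ≤ n →
      (PySem.List.pyRange 0 (r0.length : Int)).filter (QCm (r0 :: rest))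
        = (PySem.List.pyRange 0 (n : Int)).filter Qp := by
    intro n hn
    rw [PySem.List.pyRange_one_append 0 (r0.length : Int) (n : Int) (by positivity)
          (by exact_mod_cast hn), List.filter_append]
    have h1 : (PySem.List.pyRange 0 (r0.length : Int)).filter Qp
        = (PySem.List.pyRange 0 (r0.length : Int)).filter (QCm (r0 :: rest)) := by
      refine List.filter_congr ?_
      intro j hj
      rw [PySem.List.mem_pyRange_one] at hj
      simp [hQpdef, hj.2]
    have h2 : (PySem.List.pyRange (r0.length : Int) (n : Int)).filter Qp = [] := by
      refine List.filter_eq_nil_iff.mpr ?_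
      intro j hj
      rw [PySem.List.mem_pyRange_one] at hj
      simp [hQpdef]
      intro hlt
      omega
    rw [h1, h2, List.append_nil]
  -- A's per-row insertion loop is expandQ
  have hCEx : ∀ r' : List String, r0.length ≤ r'.length →
      List.foldl (fun acc p => PySem.List.insert acc (p.2 + p.1) ".") r'
        (PySem.List.enumerate
          ((PySem.List.pyRange 0 (r0.length : Int)).filter (QCm (r0 :: rest))))
        = expandQ "." Qp 0 r' := by
    intro r' h
    have := foldl_insert_enum "." r' [] 0 0 Qp
        ((PySem.List.pyRange 0 (r0.length : Int)).filter (QCm (r0 :: rest)))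
        (by simp) (by simpa using hindeq r'.length h)
    simpa using this
  -- the cell conditions agree at every natural index
  have hQc : ∀ kk : Nat,
      (decide ((kk : Int) < (r0.length : Int)) && PySem.List.pyGetD CE (kk : Int) false)
        = Qp (kk : Int) := by
    intro kk
    by_cases hkk : kk < r0.length
    · have hget : PySem.List.pyGetD CE (kk : Int) false
          = (r0 :: rest).all fun r => PySem.List.pyGetD r (0 + (kk : Int)) "" == r0[kk] := by
        rw [hCEdef, PySem.List.pyGetD_natCast, List.getD_eq_getElem?_getD, List.getElem?_map,
            PySem.List.getElem?_enumerate, List.getElem?_eq_getElem hkk]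
        simp
      have hr0 : PySem.List.pyGetD r0 (kk : Int) "" = r0[kk] := by
        rw [PySem.List.pyGetD_natCast]
        exact List.getD_eq_getElem r0 "" hkk
      rw [hget, hQpdef]
      simp only [colpred, zero_add, hr0]
    · rw [hQpdef]
      simp [hkk]
  -- B's per-row loop is the same expandQ
  have hrowB : ∀ r' : List String,
      List.foldl
        (fun e p =>
          (if (decide (p.1 < (r0.length : Int)) && PySem.List.pyGetD CE p.1 false) = true
            then e ++ ["."] else e) ++ [p.2])
        [] (PySem.List.enumerate r')
        = expandQ "." Qp 0 r' := by
    intro r'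
    rw [foldl_optdot (fun p : Int × String => decide (p.1 < (r0.length : Int)) && PySem.List.pyGetD CE p.1 false)
        "." (fun p : Int × String => p.2), List.nil_append, expandQ_eq_flatMap]
    refine (List.flatMap_congr ?_).symm
    intro p hp
    rw [PySem.List.mem_enumerate_iff] at hp
    obtain ⟨kk, hk, rfl⟩ := hp
    simp only [zero_add]
    rw [hQc kk]
  -- the all-dots row
  have hdA : List.map (fun _ : Int => ".") (PySem.List.pyRange 0 (r0.length : Int))
      = List.replicate r0.length "." := by
    refine List.eq_replicate_iff.mpr ⟨?_, ?_⟩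
    · simp [PySem.List.length_pyRange_one]
    · intro b hb
      simp at hb
      exact hb.2
  have hcnt : ((PySem.List.pyRange 0 (r0.length : Int)).filter Qp).length = List.count true CE := by
    rw [← List.countP_eq_length_filter, hCEdef, List.count_eq_countP, List.countP_map,
        PySem.List.enumerate_eq_map_pyRange r0 "", List.countP_map, PySem.List.len_eq]
    refine List.countP_congr ?_
    intro j hj
    rw [PySem.List.mem_pyRange_one] at hj
    simp only [hQpdef, Function.comp_def, beq_true]
    have hdec : decide (j < (r0.length : Int)) = true := by simp [hj.2]
    rw [hdec, Bool.true_and, colpred]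
  -- A's expansion of the inserted dot row is B's dot row
  have hdot : List.foldl (fun acc p => PySem.List.insert acc (p.2 + p.1) ".")
      (List.map (fun _ : Int => ".") (PySem.List.pyRange 0 (r0.length : Int)))
      (PySem.List.enumerate ((PySem.List.pyRange 0 (r0.length : Int)).filter (QCm (r0 :: rest))))
      = PySem.List.pyRepeat ["."] ((r0.length : Int) + (List.count true CE : Int)) := by
    rw [hCEx _ (by rw [hdA]; simp), hdA, expandQ_replicate]
    rw [PySem.List.pyRepeat_singleton,
        show (((r0.length : Int)) + (List.count true CE : Int)).toNat
            = r0.length + List.count true CE from by omega]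
    rw [show ((0 : Int) + (r0.length : Int)) = (r0.length : Int) from by ring, hcnt]
  -- row by row
  refine List.flatMap_congr ?_
  intro r hr
  simp only [row_pred_eq r]
  cases h : (!r.isEmpty && r.all fun x => x == PySem.List.pyGetD r 0 "")
  · simp only [h, Bool.false_eq_true, if_neg, ite_false, List.map_cons, List.map_nil,
      List.nil_append]
    rw [hCEx r (hlen r hr), hrowB r]
  · simp only [h, ite_true, List.map_cons, List.map_nil]
    rw [hCEx r (hlen r hr), hrowB r, hdot]
    rfl

theorem expand_matrix_spec : Claim_equal_expand_matrix := by
  intro matrix hdom hpre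
  unfold Spec_expand_matrix
  obtain ⟨hne, hlen⟩ := hpre
  cases matrix with
  | nil => exact absurd rfl hne
  | cons r0 rest => exact main_eq r0 rest (by simpa using hlen)
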